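-- pv_equiv track=rewrite | github.com/SSCT-Lab/NLPLego | grammar_check.py | check_comma
-- ===== SOURCE A (Python) =====
-- def check_comma(words, res_label):
--     comma_flag = False
--     start_flag = False
--     count = 0
--     for i in range(len(words)):
--         if res_label[i] == 1:
--             count += 1
--         if res_label[i] == 1:
--             start_flag = True
--         if (words[i] == ",") & start_flag:
--             if count > 3:
--                 comma_flag = True
--         if comma_flag & (res_label[i] == 1) & (words[i] != "."):
--             res_label[i] = 0
--
--     return res_label
-- ===== SOURCE B (Python) =====
-- def check_comma(words, res_label):
--     # Index-set formulation: the trigger is the first comma position at or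
--     # after the position of the 4th label equal to 1; from there on, labels
--     # are cleared (except on '.') by one slice assignment.
--     n = len(words)
--     ones = [i for i in range(n) if res_label[i] == 1]
--     commas = [i for i in range(n) if words[i] == ","]
--     t = None
--     if len(ones) >= 4:
--         p4 = ones[3]
--         t = next((c for c in commas if c >= p4), None)
--     if t is not None:
--         res_label[t:n] = [0 if res_label[i] == 1 and words[i] != "." else res_label[i]
--                           for i in range(t, n)]
--     return res_label
-- ===== Notes on version B (the rewrite author's own statement) =====
-- stated objective: alternative
-- what changed: Replaces A's stateful flag-carrying scan by an index-set formulation: B collects the positions of 1-labels and of commas, derives the trigger as the first comma position at or after the 4th 1-position (no counters or flags), and produces the result by one slice rebuild res[:t] + cleared middle + res[n:].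
import Mathlib
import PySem

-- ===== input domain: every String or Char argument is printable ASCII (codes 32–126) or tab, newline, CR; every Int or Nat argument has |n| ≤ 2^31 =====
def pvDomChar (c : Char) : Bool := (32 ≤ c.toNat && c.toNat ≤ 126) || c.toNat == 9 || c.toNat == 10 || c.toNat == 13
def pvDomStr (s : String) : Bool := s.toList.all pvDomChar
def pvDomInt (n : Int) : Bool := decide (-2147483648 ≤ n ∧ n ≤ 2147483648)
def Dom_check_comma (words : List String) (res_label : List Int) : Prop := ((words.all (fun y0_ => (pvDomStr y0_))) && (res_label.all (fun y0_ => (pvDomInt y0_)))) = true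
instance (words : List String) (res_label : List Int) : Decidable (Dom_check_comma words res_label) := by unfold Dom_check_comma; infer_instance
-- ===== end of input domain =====

-- B re-expresses the task through index sets: the trigger is the first comma position at or
-- after the position of the 4th label 1, and clearing is one slice rebuild; the claim is about
-- the return value (both Pythons mutate res_label in place the same way).

-- ===== PORT A =====
-- the for-loop of A, one iteration per index i, state (comma_flag, start_flag, count, res)
def check_comma_loop (words : List String) : Bool → Bool → Int → List Int → Nat → Nat → List Int
  | _, _, _, res, _, 0 => res
  | comma_flag, start_flag, count, res, i, fuel+1 =>
      let count := if res.getD i 0 = 1 then count + 1 else count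
      let start_flag := if res.getD i 0 = 1 then true else start_flag
      let comma_flag := if words.getD i "" = "," ∧ start_flag then
                          (if count > 3 then true else comma_flag) else comma_flag
      let res := if comma_flag ∧ res.getD i 0 = 1 ∧ words.getD i "" ≠ "." then res.set i 0 else res
      check_comma_loop words comma_flag start_flag count res (i+1) fuel

def check_comma (words : List String) (res_label : List Int) : List Int :=
  check_comma_loop words false false 0 res_label 0 words.length

-- ===== PORT B =====
-- transliteration of Source B: ones/commas index lists, trigger = first comma ≥ ones[3],
-- then one slice rebuild res[:t] ++ cleared middle ++ res[n:] (t, n in range, so take/drop are exact)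
def check_comma_alt (words : List String) (res_label : List Int) : List Int :=
  let n := words.length
  let ones := (List.range n).filter (fun i => res_label.getD i 0 == 1)
  let commas := (List.range n).filter (fun i => words.getD i "" == ",")
  let t := if 4 ≤ ones.length then commas.find? (fun c => decide (ones.getD 3 0 ≤ c)) else none
  match t with
  | none => res_label
  | some t =>
      res_label.take t
        ++ (List.range' t (n - t)).map (fun i =>
              if res_label.getD i 0 = 1 ∧ words.getD i "" ≠ "." then 0 else res_label.getD i 0)
        ++ res_label.drop n

-- ===== PRECONDITION & SPEC =====
-- Pre_ excludes exactly the inputs where the Pythons raise IndexError: res_label shorter than words.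
def Pre_check_comma (words : List String) (res_label : List Int) : Prop :=
  words.length ≤ res_label.length
instance (words : List String) (res_label : List Int) : Decidable (Pre_check_comma words res_label) := by unfold Pre_check_comma; infer_instance
def pvWitness_check_comma : List String × List Int :=
  (["a", ",", "b", ",", "c"], [1, 1, 1, 1, 1])
def Spec_check_comma (words : List String) (res_label : List Int) (out : List Int) : Prop := out = check_comma_alt words res_label
instance (words : List String) (res_label : List Int) (out : List Int) : Decidable (Spec_check_comma words res_label out) := by unfold Spec_check_comma; infer_instance

-- ===== CLAIM (what is proved, stated in full; the proofs are below) =====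
def Claim_equal_check_comma : Prop := ∀ (words : List String) (res_label : List Int), Dom_check_comma words res_label → Pre_check_comma words res_label → Spec_check_comma words res_label (check_comma words res_label)

-- ===== LEMMAS AND PROOFS =====

-- proof-only intermediate forms of A's loop: trigger search, then clearing sweep
def pvFindT (words : List String) (res : List Int) : Nat → Int → Nat → Option Nat
  | _, _, 0 => none
  | i, count, fuel+1 =>
      let count := if res.getD i 0 = 1 then count + 1 else count
      if words.getD i "" = "," ∧ count > 3 then some i
      else pvFindT words res (i+1) count fuel

def pvClear (words : List String) : List Int → Nat → Nat → List Int
  | res, _, 0 => res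
  | res, i, fuel+1 =>
      let res := if res.getD i 0 = 1 ∧ words.getD i "" ≠ "." then res.set i 0 else res
      pvClear words res (i+1) fuel

-- once comma_flag is true it stays true and A's iteration body degenerates to the clearing step
theorem loopA_post (words : List String) :
    ∀ (fuel i : Nat) (sf : Bool) (count : Int) (res : List Int),
      check_comma_loop words true sf count res i fuel = pvClear words res i fuel := by
  intro fuel
  induction fuel with
  | zero => intro i sf count res; rfl
  | succ n ih =>
    intro i sf count res
    simp only [check_comma_loop, pvClear, ite_self, true_and, ih]

-- while comma_flag is false (invariant: count > 3 → start_flag), A's loop equals the trigger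
-- search followed by the clearing sweep from the trigger index
theorem loopA_pre (words : List String) :
    ∀ (fuel i : Nat) (count : Int) (res : List Int) (sf : Bool),
      (3 < count → sf = true) →
      check_comma_loop words false sf count res i fuel =
        (match pvFindT words res i count fuel with
         | none => res
         | some t => pvClear words res t (i + fuel - t)) := by
  intro fuel
  induction fuel with
  | zero => intro i count res sf _; rfl
  | succ n ih =>
    intro i count res sf hsf
    simp only [check_comma_loop, pvFindT]
    by_cases h1 : res.getD i 0 = 1
    · simp only [h1, if_pos]
      by_cases h2 : words.getD i "" = "," ∧ count + 1 > 3
      · have hw : words.getD i "" ≠ "." := by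
          intro hc; rw [hc] at h2; exact absurd h2.1 (by decide)
        have hi : i + (n + 1) - i = n + 1 := by omega
        simp only [h2.1, true_and, if_pos h2.2, if_true, hi]
        rw [if_pos (show ("," : String) ≠ "." by decide)]
        rw [loopA_post, pvClear]
        rw [if_pos ⟨h1, hw⟩]
      · have hcf : (if words.getD i "" = "," ∧ True then
              (if count + 1 > 3 then true else false) else false) = false := by
          split_ifs with ha hb
          · exact absurd ⟨ha.1, hb⟩ h2
          · rfl
          · rfl
        rw [if_neg h2, hcf]
        rw [if_neg (by simp)]
        rw [ih (i+1) (count+1) res true (fun _ => rfl)]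
        have harith : ∀ t, (i + 1) + n - t = i + (n + 1) - t := fun t => by omega
        cases hft : pvFindT words res (i+1) (count+1) n with
        | none => simp
        | some t => simp [harith t]
    · simp only [h1, ite_false]
      by_cases h2 : words.getD i "" = "," ∧ count > 3
      · have hsf' : sf = true := hsf h2.2
        have hi : i + (n + 1) - i = n + 1 := by omega
        subst hsf'
        simp only [h2.1, true_and, if_pos h2.2, hi, if_true]
        rw [if_neg (by simp), loopA_post, pvClear]
        rw [if_neg (fun hc => h1 hc.1)]
      · have hcf : (if words.getD i "" = "," ∧ sf = true then
              (if count > 3 then true else false) else false) = false := by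
          split_ifs with ha hb
          · exact absurd ⟨ha.1, hb⟩ h2
          · rfl
          · rfl
        rw [if_neg h2, hcf]
        rw [if_neg (by simp)]
        rw [ih (i+1) count res sf hsf]
        have harith : ∀ t, (i + 1) + n - t = i + (n + 1) - t := fun t => by omega
        cases hft : pvFindT words res (i+1) count n with
        | none => simp
        | some t => simp [harith t]

-- the trigger search is find? of "comma and at least 4 ones so far" over the index range
theorem findT_eq (words : List String) (res : List Int) :
    ∀ (fuel i : Nat) (count : Int),
      count = (((List.range i).filter (fun k => res.getD k 0 == 1)).length : Int) →
      pvFindT words res i count fuel =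
        (List.range' i fuel).find? (fun j => words.getD j "" == "," &&
          decide (4 ≤ ((List.range (j+1)).filter (fun k => res.getD k 0 == 1)).length)) := by
  intro fuel
  induction fuel with
  | zero => intro i count _; rfl
  | succ n ih =>
    intro i count h
    have hcnt : (if res.getD i 0 = 1 then count + 1 else count)
        = (((List.range (i+1)).filter (fun k => res.getD k 0 == 1)).length : Int) := by
      rw [List.range_succ, List.filter_append]
      simp only [List.getD] at h ⊢
      by_cases h1 : res[i]?.getD 0 = 1 <;> simp [h1, h]
    rw [List.range'_succ]
    simp only [pvFindT]
    by_cases hq : words.getD i "" = ","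
    · by_cases hc : (if res.getD i 0 = 1 then count + 1 else count) > 3
      · have h4 : 4 ≤ ((List.range (i+1)).filter (fun k => res.getD k 0 == 1)).length := by
          rw [hcnt] at hc; exact_mod_cast hc
        rw [if_pos ⟨hq, hc⟩, List.find?_cons_of_pos]
        simp only [List.getD_eq_getElem?_getD] at hq h4 ⊢
        simp [hq, h4]
      · have h4 : ¬ 4 ≤ ((List.range (i+1)).filter (fun k => res.getD k 0 == 1)).length := by
          rw [hcnt] at hc; intro hx; exact hc (by exact_mod_cast hx)
        rw [if_neg (fun hx => hc hx.2), List.find?_cons_of_neg]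
        · exact ih (i+1) _ hcnt
        · simp only [List.getD_eq_getElem?_getD] at hq h4 ⊢
          simp [hq, h4]
    · rw [if_neg (fun hx => hq hx.1), List.find?_cons_of_neg]
      · exact ih (i+1) _ hcnt
      · simp only [List.getD_eq_getElem?_getD] at hq ⊢
        simp [hq]

-- "at least 4 ones among indices ≤ j" ↔ "the 4th one-position is ≤ j"
theorem fourth_one (res : List Int) (n j : Nat) (hj : j < n)
    (h4 : 4 ≤ ((List.range n).filter (fun k => res.getD k 0 == 1)).length) :
    (((List.range n).filter (fun k => res.getD k 0 == 1)).getD 3 0 ≤ j ↔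
      4 ≤ ((List.range (j+1)).filter (fun k => res.getD k 0 == 1)).length) := by
  have hsplit : (List.range n).filter (fun k => res.getD k 0 == 1)
      = (List.range (j+1)).filter (fun k => res.getD k 0 == 1)
        ++ (List.range' (j+1) (n-(j+1))).filter (fun k => res.getD k 0 == 1) := by
    rw [← List.filter_append]
    congr 1
    rw [List.range_eq_range', List.range_eq_range']
    have h2 : n = (j+1) + (n - (j+1)) := by omega
    rw [h2, ← List.range'_append (s := 0) (m := j+1) (n := n-(j+1)) (step := 1)]
    simp
  constructor
  · intro hle
    by_contra hlt
    have h3 : 3 - ((List.range (j+1)).filter (fun k => res.getD k 0 == 1)).length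
        < ((List.range' (j+1) (n-(j+1))).filter (fun k => res.getD k 0 == 1)).length := by
      rw [hsplit, List.length_append] at h4; omega
    have hget : ((List.range n).filter (fun k => res.getD k 0 == 1)).getD 3 0
        ∈ (List.range' (j+1) (n-(j+1))).filter (fun k => res.getD k 0 == 1) := by
      rw [hsplit, List.getD_eq_getElem?_getD, List.getElem?_append_right (by omega),
        List.getElem?_eq_getElem h3]
      exact List.getElem_mem h3
    have hmem := List.mem_of_mem_filter hget
    have hge := (List.mem_range'_1.1 hmem).1
    omega
  · intro h41
    have h3 : (3:Nat) < ((List.range (j+1)).filter (fun k => res.getD k 0 == 1)).length := by omega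
    have hget : ((List.range n).filter (fun k => res.getD k 0 == 1)).getD 3 0
        = ((List.range (j+1)).filter (fun k => res.getD k 0 == 1)).getD 3 0 := by
      rw [hsplit, List.getD_eq_getElem?_getD, List.getD_eq_getElem?_getD,
        List.getElem?_append_left h3]
    rw [hget]
    have hmem : ((List.range (j+1)).filter (fun k => res.getD k 0 == 1)).getD 3 0
        ∈ (List.range (j+1)).filter (fun k => res.getD k 0 == 1) := by
      rw [List.getD_eq_getElem?_getD, List.getElem?_eq_getElem h3]
      exact List.getElem_mem h3
    have hlt := List.mem_range.1 (List.mem_of_mem_filter hmem)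
    omega

theorem ones_prefix_le (res : List Int) (n j : Nat) (hj : j < n) :
    ((List.range (j+1)).filter (fun k => res.getD k 0 == 1)).length ≤
      ((List.range n).filter (fun k => res.getD k 0 == 1)).length := by
  have hsplit : (List.range n).filter (fun k => res.getD k 0 == 1)
      = (List.range (j+1)).filter (fun k => res.getD k 0 == 1)
        ++ (List.range' (j+1) (n-(j+1))).filter (fun k => res.getD k 0 == 1) := by
    rw [← List.filter_append]
    congr 1
    rw [List.range_eq_range', List.range_eq_range']
    have h2 : n = (j+1) + (n - (j+1)) := by omega
    rw [h2, ← List.range'_append (s := 0) (m := j+1) (n := n-(j+1)) (step := 1)]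
    simp
  rw [hsplit, List.length_append]
  omega

-- element-wise description of the clearing sweep
theorem pvClear_getElem? (words : List String) :
    ∀ (fuel t : Nat) (res : List Int) (i : Nat),
      (pvClear words res t fuel)[i]? =
        if t ≤ i ∧ i < t + fuel ∧ res.getD i 0 = 1 ∧ words.getD i "" ≠ "." then some 0
        else res[i]? := by
  intro fuel
  induction fuel with
  | zero =>
    intro t res i
    rw [pvClear, if_neg]
    intro h
    omega
  | succ n ih =>
    intro t res i
    simp only [pvClear]
    by_cases hc : res.getD t 0 = 1 ∧ words.getD t "" ≠ "."
    · rw [if_pos hc, ih]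
      by_cases hti : t = i
      · subst hti
        have hlen : t < res.length := by
          by_contra hl
          have h0 : res.getD t 0 = 0 := by
            rw [List.getD_eq_getElem?_getD, List.getElem?_eq_none (by omega)]
            rfl
          rw [h0] at hc
          exact absurd hc.1 (by decide)
        rw [if_neg (fun hx => by omega), if_pos ⟨Nat.le_refl t, by omega, hc⟩]
        simp [hlen]
      · have hset : (res.set t 0)[i]? = res[i]? := List.getElem?_set_ne hti
        have hsetD : (res.set t 0).getD i 0 = res.getD i 0 := by
          rw [List.getD_eq_getElem?_getD, List.getD_eq_getElem?_getD, hset]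
        rw [hset, hsetD]
        split_ifs with h1 h2 h2
        · rfl
        · exact absurd ⟨by omega, by omega, h1.2.2⟩ h2
        · exact absurd ⟨by omega, by omega, h2.2.2⟩ h1
        · rfl
    · rw [if_neg hc, ih]
      split_ifs with h1 h2 h2
      · rfl
      · exact absurd ⟨by omega, by omega, h1.2.2⟩ h2
      · by_cases hti : i = t
        · subst hti
          exact absurd h2.2.2 hc
        · exact absurd ⟨by omega, by omega, h2.2.2⟩ h1
      · rfl

-- element-wise description of B's slice rebuild
theorem rebuild_getElem? (words : List String) (res : List Int) (t : Nat)
    (ht : t < words.length) (hlen : words.length ≤ res.length) (i : Nat) :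
    (res.take t
      ++ (List.range' t (words.length - t)).map (fun k =>
            if res.getD k 0 = 1 ∧ words.getD k "" ≠ "." then 0 else res.getD k 0)
      ++ res.drop words.length)[i]? =
      if t ≤ i ∧ i < t + (words.length - t) ∧ res.getD i 0 = 1 ∧ words.getD i "" ≠ "." then some 0
      else res[i]? := by
  have htake : (res.take t).length = t := by
    rw [List.length_take]
    omega
  have hmap : ((List.range' t (words.length - t)).map (fun k =>
      if res.getD k 0 = 1 ∧ words.getD k "" ≠ "." then 0 else res.getD k 0)).length
      = words.length - t := by
    rw [List.length_map, List.length_range']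
  by_cases hi1 : i < t
  · rw [List.getElem?_append_left (by rw [List.length_append, htake, hmap]; omega),
      List.getElem?_append_left (by rw [htake]; omega),
      List.getElem?_take_of_lt hi1, if_neg (fun hx => by omega)]
  · by_cases hi2 : i < words.length
    · rw [List.getElem?_append_left (by rw [List.length_append, htake, hmap]; omega),
        List.getElem?_append_right (by rw [htake]; omega), htake,
        List.getElem?_map,
        List.getElem?_eq_getElem (by rw [List.length_range']; omega)]
      simp only [List.getElem_range']
      have hti : t + 1 * (i - t) = i := by omega
      rw [hti]
      simp only [Option.map_some]
      have hres : res[i]? = some (res.getD i 0) := by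
        rw [List.getD_eq_getElem?_getD, List.getElem?_eq_getElem (by omega)]
        rfl
      by_cases hc : res.getD i 0 = 1 ∧ words.getD i "" ≠ "."
      · rw [if_pos hc, if_pos ⟨by omega, by omega, hc⟩]
      · rw [if_neg hc, if_neg (fun hx => hc hx.2.2), hres]
    · rw [List.getElem?_append_right (by rw [List.length_append, htake, hmap]; omega)]
      rw [List.length_append, htake, hmap, List.getElem?_drop]
      rw [if_neg (fun hx => by omega)]
      congr 1
      omega

theorem find?_congr_mem {α : Type} (p q : α → Bool) :
    ∀ l : List α, (∀ a ∈ l, p a = q a) → l.find? p = l.find? q := by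
  intro l
  induction l with
  | nil => intro _; rfl
  | cons a l ih =>
    intro h
    have ha := h a List.mem_cons_self
    cases hqa : q a with
    | true => rw [List.find?_cons_of_pos (ha.trans hqa), List.find?_cons_of_pos hqa]
    | false =>
      rw [List.find?_cons_of_neg (by simp [ha, hqa]), List.find?_cons_of_neg (by simp [hqa]),
        ih (fun b hb => h b (List.mem_cons_of_mem a hb))]

-- the find?-form trigger equals B's "first comma at or after the 4th one-position"
theorem trigger_eq (words : List String) (res : List Int) :
    (List.range words.length).find? (fun j => words.getD j "" == "," &&
        decide (4 ≤ ((List.range (j+1)).filter (fun k => res.getD k 0 == 1)).length))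
    = (if 4 ≤ ((List.range words.length).filter (fun k => res.getD k 0 == 1)).length
       then ((List.range words.length).filter (fun j => words.getD j "" == ",")).find?
              (fun c => decide (((List.range words.length).filter (fun k => res.getD k 0 == 1)).getD 3 0 ≤ c))
       else none) := by
  by_cases h4 : 4 ≤ ((List.range words.length).filter (fun k => res.getD k 0 == 1)).length
  · rw [if_pos h4, List.find?_filter]
    apply find?_congr_mem
    intro j hj
    have hjn : j < words.length := List.mem_range.1 hj
    have hiff := fourth_one res words.length j hjn h4
    cases hQ : (words.getD j "" == ",") with
    | true =>
      simp
      exact hiff.symm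
    | false => simp
  · rw [if_neg h4, List.find?_eq_none]
    intro j hj
    have hjn : j < words.length := List.mem_range.1 hj
    have hle := ones_prefix_le res words.length j hjn
    simp only [List.getD_eq_getElem?_getD] at hle h4 ⊢
    simp
    intro _
    omega

-- ===== VERDICT (by name: the statement is the Claim_ definition above) =====
theorem check_comma_spec : Claim_equal_check_comma := by
  intro words res _ hpre
  unfold Spec_check_comma check_comma
  simp only [check_comma_alt]
  rw [loopA_pre words words.length 0 0 res false (fun h => absurd h (by decide)),
    findT_eq words res words.length 0 0 (by simp),
    ← List.range_eq_range', trigger_eq words res]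
  cases ho : (if 4 ≤ ((List.range words.length).filter (fun k => res.getD k 0 == 1)).length
       then ((List.range words.length).filter (fun j => words.getD j "" == ",")).find?
              (fun c => decide (((List.range words.length).filter (fun k => res.getD k 0 == 1)).getD 3 0 ≤ c))
       else none) with
  | none => rfl
  | some t =>
    have htn : t < words.length := by
      by_cases h4 : 4 ≤ ((List.range words.length).filter (fun k => res.getD k 0 == 1)).length
      · rw [if_pos h4] at ho
        exact List.mem_range.1 (List.mem_of_mem_filter (List.mem_of_find?_eq_some ho))
      · rw [if_neg h4] at ho
        cases ho
    show pvClear words res t (0 + words.length - t)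
        = res.take t
          ++ (List.range' t (words.length - t)).map (fun i =>
                if res.getD i 0 = 1 ∧ words.getD i "" ≠ "." then 0 else res.getD i 0)
          ++ res.drop words.length
    have hz : 0 + words.length - t = words.length - t := by omega
    rw [hz]
    apply List.ext_getElem?
    intro i
    rw [pvClear_getElem? words (words.length - t) t res i, rebuild_getElem? words res t htn hpre i]
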